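-- pv_equiv track=rewrite | github.com/ahmetg0/PitchPulse | get_live_games.py | _extract_competitor_ids
-- ===== SOURCE A (Python) =====
-- def _extract_competitor_ids(competitors):
--     if not isinstance(competitors, list) or not competitors:
--         return None, None
--
--     home_id = next((c.get("id") for c in competitors if c.get("qualifier") == "home" and c.get("id")), None)
--     away_id = next((c.get("id") for c in competitors if c.get("qualifier") == "away" and c.get("id")), None)
--
--     if home_id and away_id:
--         return home_id, away_id
--
--     ids_by_order = [c.get("id") for c in competitors if c.get("id")]
--     if not home_id and len(ids_by_order) >= 1:
--         home_id = ids_by_order[0]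
--     if not away_id and len(ids_by_order) >= 2:
--         away_id = ids_by_order[1]
--
--     return home_id, away_id
-- ===== SOURCE B (Python) =====
-- def _extract_competitor_ids(competitors):
--     if not isinstance(competitors, list) or not competitors:
--         return None, None
--     home_id = None
--     away_id = None
--     order = []
--     for c in competitors:
--         cid = c.get("id")
--         if cid:
--             if len(order) < 2:
--                 order.append(cid)
--             q = c.get("qualifier")
--             if home_id is None and q == "home":
--                 home_id = cid
--             if away_id is None and q == "away":
--                 away_id = cid
--     if home_id is None:
--         home_id = order[0] if order else None
--     if away_id is None:
--         away_id = order[1] if len(order) >= 2 else None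
--     return home_id, away_id
-- ===== Notes on version B (the rewrite author's own statement) =====
-- stated objective: alternative
-- what changed: Replaced A's three separate scans (two next()-generators per qualifier plus a full id list comprehension) with one single loop that simultaneously records the first 'home'/'away' truthy ids and the first two truthy ids for the positional fallback.
import Mathlib
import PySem

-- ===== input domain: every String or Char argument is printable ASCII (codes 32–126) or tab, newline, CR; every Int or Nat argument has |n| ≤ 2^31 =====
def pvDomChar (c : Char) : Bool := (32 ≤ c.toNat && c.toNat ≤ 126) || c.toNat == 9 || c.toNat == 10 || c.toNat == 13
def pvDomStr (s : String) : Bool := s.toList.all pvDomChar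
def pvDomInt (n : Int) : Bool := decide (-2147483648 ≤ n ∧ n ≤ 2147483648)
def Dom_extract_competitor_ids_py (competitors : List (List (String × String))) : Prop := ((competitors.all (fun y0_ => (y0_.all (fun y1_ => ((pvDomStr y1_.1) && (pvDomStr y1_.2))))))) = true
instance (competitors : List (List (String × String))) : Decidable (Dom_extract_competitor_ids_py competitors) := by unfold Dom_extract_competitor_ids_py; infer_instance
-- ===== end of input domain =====

-- B replaces A's three scans of the list by one loop maintaining both qualifier ids and the
-- first two truthy ids; a genuinely different decomposition of the same O(n) task.

-- shared helpers: Python's dict.get (first match) and string truthiness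
def pvGet (c : List (String × String)) (k : String) : Option String :=
  (PySem.Dict.mk c).get? k

def pvTruthy : Option String → Bool
  | some s => !(s == "")
  | none => false

-- ===== PORT A =====
-- next((c.get("id") for c in competitors if c.get("qualifier") == q and c.get("id")), None)
def pvFindQual (q : String) (cs : List (List (String × String))) : Option String :=
  match cs.find? (fun c => (pvGet c "qualifier" == some q) && pvTruthy (pvGet c "id")) with
  | some c => pvGet c "id"
  | none => none

-- [c.get("id") for c in competitors if c.get("id")]
def pvIds (cs : List (List (String × String))) : List String :=
  cs.filterMap (fun c => if pvTruthy (pvGet c "id") then pvGet c "id" else none)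

def extract_competitor_ids_py (competitors : List (List (String × String))) : Option String × Option String :=
  if competitors.isEmpty then (none, none)
  else
    let home_id := pvFindQual "home" competitors
    let away_id := pvFindQual "away" competitors
    if pvTruthy home_id && pvTruthy away_id then (home_id, away_id)
    else
      let ids_by_order := pvIds competitors
      let home_id := if !pvTruthy home_id then
          (match ids_by_order with | x :: _ => some x | [] => home_id)
        else home_id
      let away_id := if !pvTruthy away_id then
          (match ids_by_order[1]? with | some x => some x | none => away_id)
        else away_id
      (home_id, away_id)

-- ===== PORT B =====
-- the single for-loop of Source B: state = (home_id, away_id, order)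
def pvLoopB : List (List (String × String)) → Option String → Option String → List String →
    Option String × Option String × List String
  | [], h, a, ord => (h, a, ord)
  | c :: rest, h, a, ord =>
    match pvGet c "id" with
    | some cid =>
      if cid == "" then pvLoopB rest h a ord
      else
        let ord' := if ord.length < 2 then ord ++ [cid] else ord
        let q := pvGet c "qualifier"
        let h' := if h == none && q == some "home" then some cid else h
        let a' := if a == none && q == some "away" then some cid else a
        pvLoopB rest h' a' ord'
    | none => pvLoopB rest h a ord

def extract_competitor_ids_py_alt (competitors : List (List (String × String))) : Option String × Option String :=
  if competitors.isEmpty then (none, none)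
  else
    let st := pvLoopB competitors none none []
    let home_id := match st.1 with | some x => some x | none => st.2.2[0]?
    let away_id := match st.2.1 with | some x => some x | none => st.2.2[1]?
    (home_id, away_id)

-- ===== PRECONDITION & SPEC =====
def Spec_extract_competitor_ids_py (competitors : List (List (String × String))) (out : Option String × Option String) : Prop := out = extract_competitor_ids_py_alt competitors
instance (competitors : List (List (String × String))) (out : Option String × Option String) : Decidable (Spec_extract_competitor_ids_py competitors out) := by unfold Spec_extract_competitor_ids_py; infer_instance

-- ===== CLAIM (what is proved, stated in full; the proofs are below) =====
def Claim_equal_extract_competitor_ids_py : Prop := ∀ (competitors : List (List (String × String))), Dom_extract_competitor_ids_py competitors → Spec_extract_competitor_ids_py competitors (extract_competitor_ids_py competitors)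

-- ===== LEMMAS AND PROOFS =====

-- B's loop computes A's three scans at once (order capped at the first two truthy ids)
theorem pvLoopB_spec (cs : List (List (String × String))) :
    ∀ (h a : Option String) (ord : List String), ord.length ≤ 2 →
      pvLoopB cs h a ord =
        (h.or (pvFindQual "home" cs), a.or (pvFindQual "away" cs), (ord ++ pvIds cs).take 2) := by
  induction cs with
  | nil =>
    intro h a ord hlen
    simp [pvLoopB, pvFindQual, pvIds, List.take_of_length_le hlen]
  | cons c rest ih =>
    intro h a ord hlen
    cases hid : pvGet c "id" with
    | none =>
      simp [pvLoopB, hid, pvFindQual, pvIds, List.find?_cons, pvTruthy, ih h a ord hlen]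
    | some cid =>
      by_cases hemp : cid = ""
      · subst hemp
        simp [pvLoopB, hid, pvFindQual, pvIds, List.find?_cons, pvTruthy, ih h a ord hlen]
      · have hT : pvTruthy (some cid) = true := by simp [pvTruthy, hemp]
        have hlen' : (if ord.length < 2 then ord ++ [cid] else ord).length ≤ 2 := by
          split
          · simp only [List.length_append, List.length_cons, List.length_nil]; omega
          · exact hlen
        simp only [pvLoopB, hid, beq_iff_eq, hemp, if_false,
          ih _ _ _ hlen']
        simp only [Prod.mk.injEq]
        refine ⟨?_, ?_, ?_⟩
        · cases h with
          | some x => simp [pvFindQual]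
          | none =>
            by_cases hq : pvGet c "qualifier" = some "home"
            · simp [pvFindQual, List.find?_cons, hq, hT, hid]
            · simp [pvFindQual, List.find?_cons, hq, hT, hid]
        · cases a with
          | some x => simp [pvFindQual]
          | none =>
            by_cases hq : pvGet c "qualifier" = some "away"
            · simp [pvFindQual, List.find?_cons, hq, hT, hid]
            · simp [pvFindQual, List.find?_cons, hq, hT, hid]
        · have hids : pvIds (c :: rest) = cid :: pvIds rest := by
            simp [pvIds, hid, hT]
          rw [hids]
          by_cases hlt : ord.length < 2
          · simp [hlt, List.append_assoc]
          · have h2 : ord.length = 2 := by omega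
            simp only [hlt, if_false]
            rw [List.take_append_of_le_length (by omega),
                List.take_append_of_le_length (by omega)]

-- A's generator helper returns either nothing or a truthy (non-empty) id
theorem pvFindQual_truthy (q : String) (cs : List (List (String × String))) :
    pvFindQual q cs = none ∨ pvTruthy (pvFindQual q cs) = true := by
  unfold pvFindQual
  cases hf : cs.find? (fun c => (pvGet c "qualifier" == some q) && pvTruthy (pvGet c "id")) with
  | none => exact Or.inl rfl
  | some c =>
    right
    have := List.find?_some hf
    simp only [Bool.and_eq_true] at this
    simpa using this.2

theorem pvOptMatch (o : Option String) :
    (match o with | some x => some x | none => none) = o := by cases o <;> rfl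

-- take 2 preserves the first two positions
theorem getElem?_take_two_zero (l : List String) : (l.take 2)[0]? = l[0]? := by
  simp [List.getElem?_take]
theorem getElem?_take_two_one (l : List String) : (l.take 2)[1]? = l[1]? := by
  simp [List.getElem?_take]

-- ===== VERDICT (by name: the statement is the Claim_ definition above) =====
theorem extract_competitor_ids_py_spec : Claim_equal_extract_competitor_ids_py := by
  intro cs _
  unfold Spec_extract_competitor_ids_py
  cases cs with
  | nil => rfl
  | cons c rest =>
    unfold extract_competitor_ids_py extract_competitor_ids_py_alt
    rw [pvLoopB_spec (c :: rest) none none [] (by simp)]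
    simp only [List.isEmpty_cons, Bool.false_eq_true, if_false, Option.none_or, List.nil_append]
    rcases pvFindQual_truthy "home" (c :: rest) with hh | hh <;>
      rcases pvFindQual_truthy "away" (c :: rest) with ha | ha
    · -- both none
      simp [hh, ha, pvTruthy, getElem?_take_two_zero, getElem?_take_two_one]
      cases hids : pvIds (c :: rest) with
      | nil => simp
      | cons x t => exact ⟨rfl, pvOptMatch _⟩
    · -- home none, away truthy
      obtain ⟨y, hy⟩ : ∃ y, pvFindQual "away" (c :: rest) = some y := by
        cases hA : pvFindQual "away" (c :: rest) with
        | none => rw [hA] at ha; simp [pvTruthy] at ha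
        | some y => exact ⟨y, rfl⟩
      have hyne : ¬ (y = "") := by rw [hy] at ha; simpa [pvTruthy] using ha
      simp [hh, hy, pvTruthy, hyne, getElem?_take_two_zero]
      cases hids : pvIds (c :: rest) with
      | nil => simp
      | cons x t => simp
    · -- home truthy, away none
      obtain ⟨y, hy⟩ : ∃ y, pvFindQual "home" (c :: rest) = some y := by
        cases hA : pvFindQual "home" (c :: rest) with
        | none => rw [hA] at hh; simp [pvTruthy] at hh
        | some y => exact ⟨y, rfl⟩
      have hyne : ¬ (y = "") := by rw [hy] at hh; simpa [pvTruthy] using hh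
      simp [hy, ha, pvTruthy, hyne, getElem?_take_two_one]
      exact pvOptMatch _
    · -- both truthy
      obtain ⟨y, hy⟩ : ∃ y, pvFindQual "home" (c :: rest) = some y := by
        cases hA : pvFindQual "home" (c :: rest) with
        | none => rw [hA] at hh; simp [pvTruthy] at hh
        | some y => exact ⟨y, rfl⟩
      obtain ⟨z, hz⟩ : ∃ z, pvFindQual "away" (c :: rest) = some z := by
        cases hA : pvFindQual "away" (c :: rest) with
        | none => rw [hA] at ha; simp [pvTruthy] at ha
        | some z => exact ⟨z, rfl⟩
      have hyne : ¬ (y = "") := by rw [hy] at hh; simpa [pvTruthy] using hh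
      have hzne : ¬ (z = "") := by rw [hz] at ha; simpa [pvTruthy] using ha
      simp [hy, hz, pvTruthy, hyne, hzne]
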